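-- pv_equiv track=rewrite | github.com/enamoredg-n/tracewise-pcb-validator | kicad_parser.py | _iter_module_blocks
-- ===== SOURCE A (Python) =====
-- def _iter_module_blocks(text: str):
--     current: list[str] = []
--     balance = 0
--     in_module = False
--
--     for line in text.splitlines():
--         stripped = line.lstrip()
--         if not in_module and (stripped.startswith("(module ") or stripped.startswith("(footprint ")):
--             in_module = True
--             current = [line]
--             balance = line.count("(") - line.count(")")
--             if balance <= 0:
--                 yield current
--                 current = []
--                 balance = 0
--                 in_module = False
--             continue
--
--         if in_module:
--             current.append(line)
--             balance += line.count("(") - line.count(")")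
--             if balance <= 0:
--                 yield current
--                 current = []
--                 balance = 0
--                 in_module = False
-- ===== SOURCE B (Python) =====
-- def _iter_module_blocks(text: str):
--     lines = text.splitlines()
--     n = len(lines)
--     i = 0
--     while i < n:
--         line = lines[i]
--         i += 1
--         if line.lstrip().startswith("(module ") or line.lstrip().startswith("(footprint "):
--             current = [line]
--             balance = line.count("(") - line.count(")")
--             while balance > 0 and i < n:
--                 nxt = lines[i]
--                 i += 1
--                 current.append(nxt)
--                 balance += nxt.count("(") - nxt.count(")")
--             if balance <= 0:
--                 yield current
-- ===== Notes on version B (the rewrite author's own statement) =====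
-- stated objective: alternative
-- what changed: Replaces A's single for-loop with in_module/current/balance state flags by an index-driven outer scan for block starts plus a dedicated inner loop that consumes lines while the paren balance stays positive, yielding the block once balanced.
import Mathlib
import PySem

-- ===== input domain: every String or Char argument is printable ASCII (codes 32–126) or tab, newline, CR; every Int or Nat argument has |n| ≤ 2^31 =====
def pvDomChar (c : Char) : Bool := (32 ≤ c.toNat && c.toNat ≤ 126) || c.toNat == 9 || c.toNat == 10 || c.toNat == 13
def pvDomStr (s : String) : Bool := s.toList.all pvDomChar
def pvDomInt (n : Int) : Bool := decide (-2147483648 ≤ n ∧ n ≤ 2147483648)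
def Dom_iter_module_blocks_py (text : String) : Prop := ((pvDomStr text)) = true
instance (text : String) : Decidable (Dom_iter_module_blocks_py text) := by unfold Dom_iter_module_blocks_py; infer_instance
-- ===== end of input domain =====

-- B replaces A's single flag-driven loop by an outer scan for block starts with a
-- dedicated inner loop consuming lines while the paren balance is positive (alternative decomposition, same cost).


-- ===== PORT A =====
-- stripped.startswith("(module ") or stripped.startswith("(footprint ")
def pvIsStart (line : String) : Bool :=
  PySem.Str.startswith (PySem.Str.lstrip line) "(module " ||
  PySem.Str.startswith (PySem.Str.lstrip line) "(footprint "

-- line.count("(") - line.count(")")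
def pvDelta (line : String) : Int :=
  (PySem.Str.count line "(" : Int) - (PySem.Str.count line ")" : Int)

-- A's for-loop over the lines carrying (current, balance, in_module); yields collected in order
def pvGoA (lines : List String) (current : List String) (balance : Int)
    (in_module : Bool) : List (List String) :=
  match lines with
  | [] => []
  | line :: rest =>
    if !in_module && pvIsStart line then
      let b := pvDelta line
      if b ≤ 0 then [line] :: pvGoA rest [] 0 false
      else pvGoA rest [line] b true
    else if in_module then
      let cur := current ++ [line]
      let b := balance + pvDelta line
      if b ≤ 0 then cur :: pvGoA rest [] 0 false
      else pvGoA rest cur b true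
    else pvGoA rest current balance in_module

def iter_module_blocks_py (text : String) : List (List String) :=
  pvGoA (PySem.Str.splitlines text) [] 0 false

-- ===== PORT B =====
-- inner while-loop: consume lines while balance > 0; returns (current, balance, remaining lines)
def pvInnerB (lines : List String) (current : List String) (balance : Int) :
    List String × Int × List String :=
  match lines with
  | [] => (current, balance, [])
  | line :: rest =>
    if balance > 0 then pvInnerB rest (current ++ [line]) (balance + pvDelta line)
    else (current, balance, line :: rest)

theorem pvInnerB_rest_le (lines : List String) (cur : List String) (b : Int) :
    (pvInnerB lines cur b).2.2.length ≤ lines.length := by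
  induction lines generalizing cur b with
  | nil => simp [pvInnerB]
  | cons l rest ih =>
    simp only [pvInnerB]
    split
    · exact le_trans (ih _ _) (by simp)
    · simp

-- outer while-loop over indices, transcribed as recursion on the remaining lines
def pvOuterB (lines : List String) : List (List String) :=
  match lines with
  | [] => []
  | line :: rest =>
    if PySem.Str.startswith (PySem.Str.lstrip line) "(module " ||
       PySem.Str.startswith (PySem.Str.lstrip line) "(footprint " then
      let r := pvInnerB rest [line] (pvDelta line)
      (if r.2.1 ≤ 0 then [r.1] else []) ++ pvOuterB r.2.2
    else pvOuterB rest
  termination_by lines.length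
  decreasing_by
  · exact Nat.lt_succ_of_le (pvInnerB_rest_le rest [line] (pvDelta line))
  · simp

def iter_module_blocks_py_alt (text : String) : List (List String) :=
  pvOuterB (PySem.Str.splitlines text)

-- ===== PRECONDITION & SPEC =====
def Spec_iter_module_blocks_py (text : String) (out : List (List String)) : Prop := out = iter_module_blocks_py_alt text
instance (text : String) (out : List (List String)) : Decidable (Spec_iter_module_blocks_py text out) := by unfold Spec_iter_module_blocks_py; infer_instance

-- ===== CLAIM (what is proved, stated in full; the proofs are below) =====
def Claim_equal_iter_module_blocks_py : Prop := ∀ (text : String), Dom_iter_module_blocks_py text → Spec_iter_module_blocks_py text (iter_module_blocks_py text)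

-- ===== LEMMAS AND PROOFS =====

-- joint invariant: outside a module A's scan matches B's outer loop; inside a module
-- (entered only with positive balance) A's scan matches B's inner loop followed by the outer loop.
theorem pvGoA_eq_outer (lines : List String) :
    (pvGoA lines [] 0 false = pvOuterB lines) ∧
    (∀ cur b, 0 < b →
      pvGoA lines cur b true =
        (if (pvInnerB lines cur b).2.1 ≤ 0 then [(pvInnerB lines cur b).1] else []) ++
          pvOuterB (pvInnerB lines cur b).2.2) := by
  induction lines with
  | nil =>
    refine ⟨by simp [pvGoA, pvOuterB], ?_⟩
    intro cur b hb
    simp [pvGoA, pvInnerB, pvOuterB, not_le.mpr hb]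
  | cons line rest ih =>
    constructor
    · show pvGoA (line :: rest) [] 0 false = pvOuterB (line :: rest)
      rw [pvOuterB]
      by_cases hs : pvIsStart line
      · have hs' : (PySem.Str.startswith (PySem.Str.lstrip line) "(module " ||
            PySem.Str.startswith (PySem.Str.lstrip line) "(footprint ") = true := hs
        simp only [pvGoA, hs, hs', Bool.not_false, Bool.true_and, if_true]
        by_cases hb : pvDelta line ≤ 0
        · have hinner : pvInnerB rest [line] (pvDelta line) = ([line], pvDelta line, rest) := by
            cases rest with
            | nil => simp [pvInnerB]
            | cons r rs => simp [pvInnerB, not_lt.mpr hb]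
          simp [hb, hinner, ih.1]
        · rw [not_le] at hb
          simp only [not_le.mpr hb, if_false]
          exact ih.2 [line] (pvDelta line) hb
      · have hs' : (PySem.Str.startswith (PySem.Str.lstrip line) "(module " ||
            PySem.Str.startswith (PySem.Str.lstrip line) "(footprint ") = false := by
          simpa [pvIsStart] using hs
        simp [pvGoA, pvIsStart] at hs' ⊢
        simp [hs', ih.1]
    · intro cur b hb
      show pvGoA (line :: rest) cur b true = _
      have hinner : pvInnerB (line :: rest) cur b =
          pvInnerB rest (cur ++ [line]) (b + pvDelta line) := by
        simp [pvInnerB, hb]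
      rw [hinner]
      by_cases hb' : b + pvDelta line ≤ 0
      · have hinner2 : pvInnerB rest (cur ++ [line]) (b + pvDelta line) =
            (cur ++ [line], b + pvDelta line, rest) := by
          cases rest with
          | nil => simp [pvInnerB]
          | cons r rs => simp [pvInnerB, not_lt.mpr hb']
        simp [pvGoA, hb', hinner2, ih.1]
      · rw [not_le] at hb'
        simp only [pvGoA, Bool.not_true, Bool.false_and, if_false, if_true,
          not_le.mpr hb']
        simpa [not_le.mpr hb'] using ih.2 (cur ++ [line]) (b + pvDelta line) hb'

-- ===== VERDICT (by name: the statement is the Claim_ definition above) =====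
theorem iter_module_blocks_py_spec : Claim_equal_iter_module_blocks_py := by
  intro text _
  unfold Spec_iter_module_blocks_py iter_module_blocks_py iter_module_blocks_py_alt
  exact (pvGoA_eq_outer (PySem.Str.splitlines text)).1
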